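-- pv_equiv track=rewrite | github.com/Rev4nchist/agent-arch | backend/src/context_service.py | _extract_page_keywords
-- ===== SOURCE A (Python) =====
-- from typing import List, Optional, Tuple
--
-- def _extract_page_keywords(page_path: str) -> List[str]:
--     """Extract keywords from current page path."""
--     page_map = {
--         "/": ["dashboard"],
--         "/dashboard": ["dashboard"],
--         "/decisions": ["proposals", "decisions"],
--         "/meetings": ["meetings"],
--         "/tasks": ["tasks"],
--         "/agents": ["agents"],
--         "/feedback": ["feedback"],
--         "/resources": ["resources"],
--         "/tech-radar": ["tech radar"],
--         "/audit": ["audit"],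
--         "/guide": ["guide"],
--     }
--
--     for path, keywords in page_map.items():
--         if page_path == path or page_path.startswith(path + "/"):
--             return keywords
--     return []
-- ===== SOURCE B (Python) =====
-- from typing import List
--
-- _PAGE_MAP = {
--     "/": ["dashboard"],
--     "/dashboard": ["dashboard"],
--     "/decisions": ["proposals", "decisions"],
--     "/meetings": ["meetings"],
--     "/tasks": ["tasks"],
--     "/agents": ["agents"],
--     "/feedback": ["feedback"],
--     "/resources": ["resources"],
--     "/tech-radar": ["tech radar"],
--     "/audit": ["audit"],
--     "/guide": ["guide"],
-- }
--
-- def _extract_page_keywords(page_path: str) -> List[str]: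
--     """Extract keywords from current page path."""
--     if not page_path.startswith("/"):
--         return []
--     seg = ""
--     for ch in page_path[1:]:
--         if ch == "/":
--             break
--         seg += ch
--     return _PAGE_MAP.get("/" + seg, [])
-- ===== Notes on version B (the rewrite author's own statement) =====
-- stated objective: simpler
-- what changed: B replaces A's linear scan of all eleven map entries with equality/prefix tests by computing the first path segment once and doing a single dict lookup on the computed key.
import Mathlib
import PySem

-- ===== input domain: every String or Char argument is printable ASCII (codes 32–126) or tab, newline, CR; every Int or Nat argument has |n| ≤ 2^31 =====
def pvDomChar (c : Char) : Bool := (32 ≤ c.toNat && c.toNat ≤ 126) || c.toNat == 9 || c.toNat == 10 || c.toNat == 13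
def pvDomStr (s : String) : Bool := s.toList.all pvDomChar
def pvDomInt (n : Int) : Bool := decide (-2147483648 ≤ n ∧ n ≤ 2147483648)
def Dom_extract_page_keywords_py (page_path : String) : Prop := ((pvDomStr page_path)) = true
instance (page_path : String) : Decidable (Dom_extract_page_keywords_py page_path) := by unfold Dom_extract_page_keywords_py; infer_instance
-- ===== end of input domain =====

-- B replaces A's prefix-test scan over all eleven map entries by computing the first
-- path segment once and doing a single dict lookup (objective: simpler one-lookup form).

-- ===== PORT A =====
-- the page_map dict literal (the same dict literal appears in both Pythons; keys are distinct)
def pvPageMap : PySem.Dict String (List String) :=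
  PySem.Dict.mk
    [ ("/", ["dashboard"]),
      ("/dashboard", ["dashboard"]),
      ("/decisions", ["proposals", "decisions"]),
      ("/meetings", ["meetings"]),
      ("/tasks", ["tasks"]),
      ("/agents", ["agents"]),
      ("/feedback", ["feedback"]),
      ("/resources", ["resources"]),
      ("/tech-radar", ["tech radar"]),
      ("/audit", ["audit"]),
      ("/guide", ["guide"]) ]

-- the 'for path, keywords in page_map.items(): …' loop of A
def pvScanA (page_path : String) : List (String × List String) → List String
  | [] => []
  | (path, keywords) :: rest =>
      if page_path == path || PySem.Str.startswith page_path (path ++ "/") then keywords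
      else pvScanA page_path rest

def extract_page_keywords_py (page_path : String) : List String :=
  pvScanA page_path pvPageMap.items

-- ===== PORT B =====
-- the 'for ch in page_path[1:]: if ch == "/": break; seg += ch' loop of B
def pvSeg : List Char → List Char
  | [] => []
  | c :: rest => if c = '/' then [] else c :: pvSeg rest

def extract_page_keywords_py_alt (page_path : String) : List String :=
  if PySem.Str.startswith page_path "/" = false then []
  else
    let seg := pvSeg (PySem.Str.slice page_path (some 1) none).toList
    pvPageMap.getD ("/" ++ String.ofList seg) []

-- ===== PRECONDITION & SPEC =====
def Spec_extract_page_keywords_py (page_path : String) (out : List String) : Prop := out = extract_page_keywords_py_alt page_path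
instance (page_path : String) (out : List String) : Decidable (Spec_extract_page_keywords_py page_path out) := by unfold Spec_extract_page_keywords_py; infer_instance

-- ===== CLAIM (what is proved, stated in full; the proofs are below) =====
def Claim_equal_extract_page_keywords_py : Prop := ∀ (page_path : String), Dom_extract_page_keywords_py page_path → Spec_extract_page_keywords_py page_path (extract_page_keywords_py page_path)

-- ===== LEMMAS AND PROOFS =====

-- every key of the map starts with '/' and contains no further '/'
def pvKeysOK (es : List (String × List String)) : Prop :=
  ∀ p ∈ es, p.1.toList.head? = some '/' ∧ '/' ∉ p.1.toList.tail

theorem pv_ofList_beq (a b : List Char) :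
    (String.ofList a == String.ofList b) = decide (a = b) := by
  by_cases h : a = b
  · simp [h]
  · have hne : ¬ String.ofList a = String.ofList b := fun he =>
      h (by simpa using congrArg String.toList he)
    simp [h, hne]

-- A's match condition on a '/'-path holds exactly when the first segment equals the key tail
theorem pv_match_iff (w : List Char) (hw : '/' ∉ w) (rest : List Char) :
    (rest = w ∨ (w ++ ['/']) <+: rest) ↔ pvSeg rest = w := by
  induction w generalizing rest with
  | nil =>
      cases rest with
      | nil => simp [pvSeg]
      | cons c r =>
          simp only [pvSeg, List.nil_append]
          constructor
          · rintro (h | h)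
            · exact absurd h (by simp)
            · rw [List.cons_prefix_cons] at h
              simp [h.1.symm]
          · intro h
            by_cases hc : c = '/'
            · exact Or.inr (by rw [List.cons_prefix_cons]; exact ⟨hc.symm, List.nil_prefix⟩)
            · simp [hc] at h
  | cons a w' ih =>
      have ha : a ≠ '/' := fun h => hw (by simp [h])
      have hw' : '/' ∉ w' := fun h => hw (by simp [h])
      cases rest with
      | nil =>
          constructor
          · rintro (h | h)
            · exact absurd h (by simp)
            · exact absurd (List.prefix_nil.mp h) (by simp)
          · intro h; exact absurd h (by simp [pvSeg])
      | cons c r =>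
          by_cases hc : c = a
          · subst hc
            have hcond : pvSeg (c :: r) = c :: pvSeg r := by simp [pvSeg, ha]
            rw [hcond]
            constructor
            · rintro (h | h)
              · have : r = w' := by simpa using h
                rw [(ih hw' r).mp (Or.inl this)]
              · rw [List.cons_append, List.cons_prefix_cons] at h
                rw [(ih hw' r).mp (Or.inr h.2)]
            · intro h
              have : pvSeg r = w' := by simpa using h
              rcases (ih hw' r).mpr this with h1 | h1
              · exact Or.inl (by rw [h1])
              · exact Or.inr (by rw [List.cons_append, List.cons_prefix_cons]; exact ⟨rfl, h1⟩)
          · constructor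
            · rintro (h | h)
              · exact absurd h (by simp [hc])
              · rw [List.cons_append, List.cons_prefix_cons] at h
                exact absurd h.1.symm hc
            · intro h
              by_cases hsl : c = '/'
              · simp [pvSeg, hsl] at h
              · simp only [pvSeg, if_neg hsl, List.cons.injEq] at h
                exact absurd h.1 hc

theorem pv_slash_toList : ("/" : String).toList = ['/'] := by decide

-- the scan over '/'-keyed entries equals a lookup by the first segment
theorem pv_scan_eq_lookup (es : List (String × List String)) (hks : pvKeysOK es)
    (rest : List Char) :
    pvScanA (String.ofList ('/' :: rest)) es
      = (PySem.Dict.mk es).getD (String.ofList ('/' :: pvSeg rest)) [] := by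
  induction es with
  | nil => simp [pvScanA, PySem.Dict.getD, PySem.Dict.get?]
  | cons p es ih =>
      obtain ⟨key, kws⟩ := p
      obtain ⟨hhead, htail⟩ := hks ⟨key, kws⟩ (by simp)
      obtain ⟨w, hw, hkey⟩ : ∃ w, '/' ∉ w ∧ key = String.ofList ('/' :: w) := by
        rcases hkl : key.toList with _ | ⟨k0, kt⟩
        · simp [hkl] at hhead
        · simp only [hkl, List.head?_cons, Option.some.injEq] at hhead
          refine ⟨kt, by simpa [hkl] using htail, ?_⟩
          rw [← String.ofList_toList (s := key), hkl, hhead]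
      subst hkey
      have hsw : PySem.Str.startswith (String.ofList ('/' :: rest))
          (String.ofList ('/' :: w) ++ "/") = decide ((w ++ ['/']) <+: rest) := by
        have htl : (String.ofList ('/' :: w) ++ "/").toList = '/' :: (w ++ ['/']) := by
          rw [String.toList_append, String.toList_ofList, pv_slash_toList]; simp
        rw [PySem.Str.startswith_eq, String.toList_ofList, htl]
        by_cases hp : (w ++ ['/']) <+: rest
        · have hpre : ('/' :: (w ++ ['/'])) <+: ('/' :: rest) := by
            rw [List.cons_prefix_cons]; exact ⟨rfl, hp⟩
          simp [hp, (PySem.Chars.startswith_iff _ _).mpr hpre]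
        · have hnp : ¬ ('/' :: (w ++ ['/'])) <+: ('/' :: rest) := by
            rw [List.cons_prefix_cons]; exact fun h => hp h.2
          have hfalse : PySem.Chars.startswith ('/' :: rest) ('/' :: (w ++ ['/'])) = false := by
            rcases hb : PySem.Chars.startswith ('/' :: rest) ('/' :: (w ++ ['/'])) with _ | _
            · rfl
            · exact absurd ((PySem.Chars.startswith_iff _ _).mp hb) hnp
          simp [hp, hfalse]
      have hcond : (String.ofList ('/' :: rest) == String.ofList ('/' :: w)
          || PySem.Str.startswith (String.ofList ('/' :: rest)) (String.ofList ('/' :: w) ++ "/"))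
          = decide (pvSeg rest = w) := by
        rw [pv_ofList_beq, hsw]
        by_cases h : pvSeg rest = w
        · rcases (pv_match_iff w hw rest).mpr h with h1 | h1
          · subst h1; simp [h]
          · simp [h, h1]
        · have h1 : ¬ (('/' :: rest : List Char) = '/' :: w) := fun he =>
            h ((pv_match_iff w hw rest).mp (Or.inl (by simpa using he)))
          have h2 : ¬ ((w ++ ['/']) <+: rest) := fun hp =>
            h ((pv_match_iff w hw rest).mp (Or.inr hp))
          simp [h, h1, h2]
      simp only [pvScanA, hcond]
      have hks' : pvKeysOK es := fun q hq => hks q (by simp [hq])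
      by_cases h : pvSeg rest = w
      · rw [if_pos (by simp [h])]
        simp [PySem.Dict.getD, PySem.Dict.get?_mk_cons, h]
      · rw [if_neg (by simp [h])]
        rw [ih hks']
        have hne : ¬ (('/' :: w : List Char) = '/' :: pvSeg rest) := fun he =>
          h (by simpa using he.symm)
        simp [PySem.Dict.getD, PySem.Dict.get?_mk_cons, pv_ofList_beq, hne]

-- the scan never matches when the path does not start with '/'
theorem pv_scan_nomatch (es : List (String × List String)) (hks : pvKeysOK es)
    (s : String) (hs : s.toList.head? ≠ some '/') :
    pvScanA s es = [] := by
  induction es with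
  | nil => simp [pvScanA]
  | cons p es ih =>
      obtain ⟨key, kws⟩ := p
      obtain ⟨hhead, _⟩ := hks ⟨key, kws⟩ (by simp)
      have hks' : pvKeysOK es := fun q hq => hks q (by simp [hq])
      have h1 : (s == key) = false := by
        rcases h : s == key with _ | _
        · rfl
        · rw [beq_iff_eq] at h
          exact absurd (h ▸ hhead) hs
      have h2 : PySem.Str.startswith s (key ++ "/") = false := by
        rcases h : PySem.Str.startswith s (key ++ "/") with _ | _
        · rfl
        · exfalso
          rw [PySem.Str.startswith_eq] at h
          have hp := (PySem.Chars.startswith_iff _ _).mp h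
          rw [String.toList_append] at hp
          rcases hkl : key.toList with _ | ⟨k0, kt⟩
          · simp [hkl] at hhead
          · rw [hkl] at hhead hp
            simp only [List.head?_cons, Option.some.injEq] at hhead
            rcases hp with ⟨t, ht⟩
            rcases hsl : s.toList with _ | ⟨s0, st⟩
            · rw [hsl] at ht; simp at ht
            · rw [hsl] at ht
              simp only [List.cons_append, List.cons.injEq] at ht
              rw [hsl] at hs
              exact hs (by simp [← ht.1, hhead])
      simp only [pvScanA, h1, h2, Bool.or_false]
      exact ih hks'

theorem pv_keysOK_pvPageMap : pvKeysOK pvPageMap.items := by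
  unfold pvKeysOK pvPageMap
  decide

-- ===== VERDICT (by name: the statement is the Claim_ definition above) =====
theorem extract_page_keywords_py_spec : Claim_equal_extract_page_keywords_py := by
  intro s _
  unfold Spec_extract_page_keywords_py extract_page_keywords_py extract_page_keywords_py_alt
  rcases hcs : s.toList with _ | ⟨c, rest⟩
  · have hA : pvScanA s pvPageMap.items = [] :=
      pv_scan_nomatch _ pv_keysOK_pvPageMap s (by rw [hcs]; simp)
    have hB : PySem.Str.startswith s "/" = false := by
      rw [PySem.Str.startswith_eq, hcs]; decide
    rw [hA, hB]; simp
  · by_cases hc : c = '/'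
    · subst hc
      have hB : PySem.Str.startswith s "/" = true := by
        rw [PySem.Str.startswith_eq, hcs]
        exact (PySem.Chars.startswith_iff _ _).mpr (by
          rw [pv_slash_toList, List.cons_prefix_cons]
          exact ⟨rfl, List.nil_prefix⟩)
      rw [hB]
      simp only [Bool.true_eq_false, if_false]
      have hslice : (PySem.Str.slice s (some 1) none).toList = rest := by
        rw [PySem.Str.toList_slice, PySem.Chars.slice_eq_listSlice, hcs]
        rw [show ((1 : Int)) = ((1 : Nat) : Int) from rfl, PySem.List.slice_from]
        · simp
        · norm_num
      have hkey : ("/" ++ String.ofList (pvSeg rest) : String)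
          = String.ofList ('/' :: pvSeg rest) := by
        have htl : ("/" ++ String.ofList (pvSeg rest) : String).toList
            = '/' :: pvSeg rest := by
          rw [String.toList_append, String.toList_ofList]
          simp
        rw [← String.ofList_toList (s := ("/" ++ String.ofList (pvSeg rest) : String)), htl]
      rw [hslice, hkey]
      have hs2 : s = String.ofList ('/' :: rest) := by
        rw [← String.ofList_toList (s := s), hcs]
      rw [hs2]
      exact pv_scan_eq_lookup pvPageMap.items pv_keysOK_pvPageMap rest
    · have hA : pvScanA s pvPageMap.items = [] :=
        pv_scan_nomatch _ pv_keysOK_pvPageMap s (by rw [hcs]; simp [hc])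
      have hB : PySem.Str.startswith s "/" = false := by
        rw [PySem.Str.startswith_eq, hcs]
        rcases h : PySem.Chars.startswith (c :: rest) ("/" : String).toList with _ | _
        · rfl
        · have hp := (PySem.Chars.startswith_iff _ _).mp h
          rw [pv_slash_toList, List.cons_prefix_cons] at hp
          exact absurd hp.1.symm hc
      rw [hA, hB]; simp
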